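-- pv_equiv track=rewrite | github.com/kai3n/Daily-commit-project | Sanghyun/week34/옹알이1.py | solution
-- ===== SOURCE A (Python) =====
-- def solution(babbling):
--     # 발음 할수있는거 개수저장
--     answer=0
--     for value in babbling:
--         word = ''
--         # 문자를 다 저장
--         for i in value:
--             word +=i
--             # 발음 할수있는게 있으면 word 갱신
--             if word in ['aya','ye','woo','ma']:
--                 word = ''
--         # word가 0이면 다 발음 가능하므로 개수 갱신
--         if len(word)==0:
--             answer+=1
--     # 발음 할수있는 개수 반환
--     return answer
-- ===== SOURCE B (Python) =====
-- UNITS = ('aya', 'ye', 'woo', 'ma')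
--
-- def _ok(s):
--     # top-down: strip one pronounceable unit off the front and recurse
--     if s == '':
--         return True
--     for u in UNITS:
--         if s.startswith(u) and _ok(s[len(u):]):
--             return True
--     return False
--
-- def solution(babbling):
--     return sum(1 for value in babbling if _ok(value))
-- ===== Notes on version B (the rewrite author's own statement) =====
-- stated objective: alternative
-- what changed: Replaced A's char-by-char accumulator state machine (grow word, reset on a unit) with a top-down recursive decomposition that strips one pronounceable unit prefix off the string and recurses.
import Mathlib
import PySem

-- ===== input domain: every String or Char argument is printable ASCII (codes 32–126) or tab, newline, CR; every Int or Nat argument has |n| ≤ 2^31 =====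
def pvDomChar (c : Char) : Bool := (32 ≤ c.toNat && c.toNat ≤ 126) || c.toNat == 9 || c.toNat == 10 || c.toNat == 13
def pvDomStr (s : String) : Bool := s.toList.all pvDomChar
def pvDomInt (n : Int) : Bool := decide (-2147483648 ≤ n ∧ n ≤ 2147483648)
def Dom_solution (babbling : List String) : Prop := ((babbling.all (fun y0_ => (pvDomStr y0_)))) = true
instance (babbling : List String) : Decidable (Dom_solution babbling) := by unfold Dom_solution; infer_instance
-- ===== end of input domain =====

-- ===== PORT A =====
-- A scans each string char by char, growing `word` and resetting it whenever it equals a unit.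
def pvStep (word : List Char) (i : Char) : List Char :=
  let w := word ++ [i]
  if w = ['a','y','a'] ∨ w = ['y','e'] ∨ w = ['w','o','o'] ∨ w = ['m','a'] then [] else w

def solution (babbling : List String) : Int :=
  babbling.foldl
    (fun answer value =>
      let word := value.toList.foldl pvStep []
      if word.length = 0 then answer + 1 else answer)
    0

-- ===== PORT B =====
-- B strips one pronounceable unit off the front and recurses (s.startswith(u) and ok(rest)).
def pvOk (l : List Char) : Bool :=
  if l = [] then true
  else if l.take 3 = ['a','y','a'] then pvOk (l.drop 3)
  else if l.take 2 = ['y','e'] then pvOk (l.drop 2)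
  else if l.take 3 = ['w','o','o'] then pvOk (l.drop 3)
  else if l.take 2 = ['m','a'] then pvOk (l.drop 2)
  else false
termination_by l.length
decreasing_by
  all_goals
    rename_i h1 _
    have hl : l ≠ [] := by assumption
    have : 0 < l.length := List.length_pos_iff.mpr hl
    simp [List.length_drop]
    all_goals omega

def solution_alt (babbling : List String) : Int :=
  ((babbling.filter (fun value => pvOk value.toList)).length : Int)

-- ===== PRECONDITION & SPEC =====
def Spec_solution (babbling : List String) (out : Int) : Prop := out = solution_alt babbling
instance (babbling : List String) (out : Int) : Decidable (Spec_solution babbling out) := by unfold Spec_solution; infer_instance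

-- ===== CLAIM (what is proved, stated in full; the proofs are below) =====
def Claim_equal_solution : Prop := ∀ (babbling : List String), Dom_solution babbling → Spec_solution babbling (solution babbling)

-- ===== LEMMAS AND PROOFS =====

-- the nonempty proper-prefix states of the units: once `word` leaves {[]} ∪ this set it never empties again
def pvLive : List (List Char) := [['a'], ['a','y'], ['y'], ['w'], ['w','o'], ['m']]

theorem pv_dead : ∀ (l w : List Char), w ≠ [] → w ∉ pvLive → List.foldl pvStep w l ≠ [] := by
  intro l
  induction l with
  | nil => intro w hne _; simpa using hne
  | cons c r ih =>
    intro w hne hnl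
    have hstep : pvStep w c = w ++ [c] := by
      unfold pvStep
      have : ¬ (w ++ [c] = ['a','y','a'] ∨ w ++ [c] = ['y','e'] ∨ w ++ [c] = ['w','o','o'] ∨ w ++ [c] = ['m','a']) := by
        rintro (h | h | h | h) <;>
        · have hr := congrArg List.reverse h
          simp at hr
          obtain ⟨_, hw⟩ := hr
          have hw' := congrArg List.reverse hw
          simp at hw'
          subst hw'
          simp [pvLive] at hnl
      simp [this]
    rw [List.foldl_cons, hstep]
    apply ih
    · simp
    · intro hmem
      simp [pvLive] at hmem
      rcases hmem with h | h | h | h | h | h <;>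
      · have hr := congrArg List.reverse h
        simp at hr
        obtain ⟨_, hw⟩ := hr
        have hw' := congrArg List.reverse hw
        simp at hw'
        first
          | exact hne hw'
          | (subst hw'; simp [pvLive] at hnl)

theorem pv_main : ∀ (l : List Char), (List.foldl pvStep [] l = []) ↔ pvOk l = true := by
  intro l
  induction hn : l.length using Nat.strong_induction_on generalizing l with
  | _ n ih =>
  subst hn
  rcases l with _ | ⟨c1, l1⟩
  · simp [pvOk]
  rcases l1 with _ | ⟨c2, l2⟩
  · rw [pvOk]; simp [pvStep]
  by_cases h1 : c1 = 'a'
  · subst h1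
    by_cases h2 : c2 = 'y'
    · subst h2
      rcases l2 with _ | ⟨c3, l3⟩
      · rw [pvOk]; simp [pvStep]
      by_cases h3 : c3 = 'a'
      · subst h3
        rw [show List.foldl pvStep [] ('a'::'y'::'a'::l3) = List.foldl pvStep [] l3 by
              simp [pvStep]]
        rw [show pvOk ('a'::'y'::'a'::l3) = pvOk l3 by rw [pvOk]; simp]
        exact ih l3.length (by simp only [List.length_cons]; omega) l3 rfl
      · rw [show List.foldl pvStep [] ('a'::'y'::c3::l3) = List.foldl pvStep (['a','y',c3]) l3 by
              simp [pvStep, h3]]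
        rw [show pvOk ('a'::'y'::c3::l3) = false by rw [pvOk]; simp [h3]]
        simpa using pv_dead l3 ['a','y',c3] (by simp) (by simp [pvLive])
    · rw [show List.foldl pvStep [] ('a'::c2::l2) = List.foldl pvStep (['a',c2]) l2 by
            simp [pvStep]]
      rw [show pvOk ('a'::c2::l2) = false by rw [pvOk]; simp [h2]]
      simpa using pv_dead l2 ['a',c2] (by simp) (by simp [pvLive, h2])
  · by_cases h1y : c1 = 'y'
    · subst h1y
      by_cases h2 : c2 = 'e'
      · subst h2
        rw [show List.foldl pvStep [] ('y'::'e'::l2) = List.foldl pvStep [] l2 by simp [pvStep]]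
        rw [show pvOk ('y'::'e'::l2) = pvOk l2 by rw [pvOk]; simp]
        exact ih l2.length (by simp only [List.length_cons]; omega) l2 rfl
      · rw [show List.foldl pvStep [] ('y'::c2::l2) = List.foldl pvStep (['y',c2]) l2 by
              simp [pvStep, h2]]
        rw [show pvOk ('y'::c2::l2) = false by rw [pvOk]; simp [h2]]
        simpa using pv_dead l2 ['y',c2] (by simp) (by simp [pvLive])
    · by_cases h1w : c1 = 'w'
      · subst h1w
        by_cases h2 : c2 = 'o'
        · subst h2
          rcases l2 with _ | ⟨c3, l3⟩
          · rw [pvOk]; simp [pvStep]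
          by_cases h3 : c3 = 'o'
          · subst h3
            rw [show List.foldl pvStep [] ('w'::'o'::'o'::l3) = List.foldl pvStep [] l3 by
                  simp [pvStep]]
            rw [show pvOk ('w'::'o'::'o'::l3) = pvOk l3 by rw [pvOk]; simp]
            exact ih l3.length (by simp only [List.length_cons]; omega) l3 rfl
          · rw [show List.foldl pvStep [] ('w'::'o'::c3::l3) = List.foldl pvStep (['w','o',c3]) l3 by
                  simp [pvStep, h3]]
            rw [show pvOk ('w'::'o'::c3::l3) = false by rw [pvOk]; simp [h3]]
            simpa using pv_dead l3 ['w','o',c3] (by simp) (by simp [pvLive])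
        · rw [show List.foldl pvStep [] ('w'::c2::l2) = List.foldl pvStep (['w',c2]) l2 by
                simp [pvStep]]
          rw [show pvOk ('w'::c2::l2) = false by rw [pvOk]; simp [h2]]
          simpa using pv_dead l2 ['w',c2] (by simp) (by simp [pvLive, h2])
      · by_cases h1m : c1 = 'm'
        · subst h1m
          by_cases h2 : c2 = 'a'
          · subst h2
            rw [show List.foldl pvStep [] ('m'::'a'::l2) = List.foldl pvStep [] l2 by simp [pvStep]]
            rw [show pvOk ('m'::'a'::l2) = pvOk l2 by rw [pvOk]; simp]
            exact ih l2.length (by simp only [List.length_cons]; omega) l2 rfl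
          · rw [show List.foldl pvStep [] ('m'::c2::l2) = List.foldl pvStep (['m',c2]) l2 by
                  simp [pvStep, h2]]
            rw [show pvOk ('m'::c2::l2) = false by rw [pvOk]; simp [h2]]
            simpa using pv_dead l2 ['m',c2] (by simp) (by simp [pvLive])
        · rw [show List.foldl pvStep [] (c1::c2::l2) = List.foldl pvStep ([c1]) (c2::l2) by
                simp [pvStep, h1, h1y, h1m]]
          rw [show pvOk (c1::c2::l2) = false by rw [pvOk]; simp [h1, h1y, h1w, h1m]]
          simpa using pv_dead (c2::l2) [c1] (by simp) (by simp [pvLive, h1, h1y, h1w, h1m])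

theorem pv_count (bs : List String) : ∀ (a : Int),
    List.foldl (fun answer value =>
      let word := value.toList.foldl pvStep []
      if word.length = 0 then answer + 1 else answer) a bs
    = a + ((bs.filter (fun value => pvOk value.toList)).length : Int) := by
  induction bs with
  | nil => intro a; simp
  | cons v bs ih =>
    intro a
    rw [List.foldl_cons, ih]
    by_cases h : pvOk v.toList = true
    · have hz : (v.toList.foldl pvStep []).length = 0 := by
        simpa [List.length_eq_zero_iff] using (pv_main v.toList).mpr h
      simp [hz, h]
      ring
    · have hz : ¬ (v.toList.foldl pvStep []).length = 0 := by
        simp [List.length_eq_zero_iff]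
        intro he
        exact h ((pv_main v.toList).mp he)
      simp [hz, h]

-- ===== VERDICT (by name: the statement is the Claim_ definition above) =====
theorem solution_spec : Claim_equal_solution := by
  unfold Claim_equal_solution Spec_solution
  intro babbling _
  unfold solution solution_alt
  simpa using pv_count babbling 0
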